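-- pv_equiv track=rewrite | github.com/gregsvo/python | for_fun/yesterdays_stocks.py | get_buy_price_and_time
-- ===== SOURCE A (Python) =====
-- def get_buy_price_and_time(stock_prices_yesterday):
--     buy_stock_price = stock_prices_yesterday[0]
--     buy_stock_time = 0
--     for price in stock_prices_yesterday:
--         if buy_stock_price > price:
--             buy_stock_price = price
--     buy_stock_time = stock_prices_yesterday.index(buy_stock_price)
--     return buy_stock_price, buy_stock_time
-- ===== SOURCE B (Python) =====
-- def get_buy_price_and_time(stock_prices_yesterday):
--     buy_stock_price = stock_prices_yesterday[0]
--     buy_stock_time = 0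
--     for i, price in enumerate(stock_prices_yesterday):
--         if price < buy_stock_price:
--             buy_stock_price = price
--             buy_stock_time = i
--     return buy_stock_price, buy_stock_time
-- ===== Notes on version B (the rewrite author's own statement) =====
-- stated objective: alternative
-- what changed: Replaces A's two scans (a min-finding loop plus a trailing list.index scan) with one enumerate pass that tracks the minimum and its first index together, using strict '<' to keep the first occurrence.
import Mathlib
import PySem

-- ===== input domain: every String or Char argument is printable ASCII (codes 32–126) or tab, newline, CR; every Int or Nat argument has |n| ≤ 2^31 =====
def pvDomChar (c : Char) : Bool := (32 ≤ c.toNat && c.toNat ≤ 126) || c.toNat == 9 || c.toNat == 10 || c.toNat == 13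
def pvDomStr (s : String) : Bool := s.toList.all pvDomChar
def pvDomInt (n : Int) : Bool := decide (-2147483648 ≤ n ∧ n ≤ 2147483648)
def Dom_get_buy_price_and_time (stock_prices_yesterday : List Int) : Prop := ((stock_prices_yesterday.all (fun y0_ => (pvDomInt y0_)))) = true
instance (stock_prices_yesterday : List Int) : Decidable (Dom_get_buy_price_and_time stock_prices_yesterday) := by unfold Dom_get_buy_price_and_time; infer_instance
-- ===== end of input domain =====

-- B replaces A's two scans (min loop + trailing .index scan) by one enumerate pass tracking price and index together; return values only (no mutation in either).

-- ===== PORT A =====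
def get_buy_price_and_time (stock_prices_yesterday : List Int) : Int × Int :=
  match PySem.List.pyGet? stock_prices_yesterday 0 with   -- stock_prices_yesterday[0]: IndexError on [] (excluded by Pre_)
  | none => (0, 0)
  | some h =>
    let buy_stock_price :=
      stock_prices_yesterday.foldl (fun b price => if b > price then price else b) h
    let buy_stock_time : Int :=
      ((PySem.List.index? stock_prices_yesterday buy_stock_price).getD 0 : Nat)
      -- .index never raises here: the minimum is an element of the list
    (buy_stock_price, buy_stock_time)

-- ===== PORT B =====
def get_buy_price_and_time_alt (stock_prices_yesterday : List Int) : Int × Int :=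
  match PySem.List.pyGet? stock_prices_yesterday 0 with   -- stock_prices_yesterday[0]: IndexError on [] (excluded by Pre_)
  | none => (0, 0)
  | some h =>
    (PySem.List.enumerate stock_prices_yesterday 0).foldl
      (fun acc ip => if ip.2 < acc.1 then (ip.2, ip.1) else acc) (h, 0)

-- ===== PRECONDITION & SPEC =====
-- Pre_ excludes only the empty list, on which A (and B) raise IndexError at stock_prices_yesterday[0].
def Pre_get_buy_price_and_time (stock_prices_yesterday : List Int) : Prop :=
  stock_prices_yesterday ≠ []
instance (stock_prices_yesterday : List Int) : Decidable (Pre_get_buy_price_and_time stock_prices_yesterday) := by unfold Pre_get_buy_price_and_time; infer_instance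
def pvWitness_get_buy_price_and_time : List Int := [3, 1, 2, 1]

def Spec_get_buy_price_and_time (stock_prices_yesterday : List Int) (out : Int × Int) : Prop := out = get_buy_price_and_time_alt stock_prices_yesterday
instance (stock_prices_yesterday : List Int) (out : Int × Int) : Decidable (Spec_get_buy_price_and_time stock_prices_yesterday out) := by unfold Spec_get_buy_price_and_time; infer_instance

-- ===== CLAIM (what is proved, stated in full; the proofs are below) =====
def Claim_equal_get_buy_price_and_time : Prop := ∀ (stock_prices_yesterday : List Int), Dom_get_buy_price_and_time stock_prices_yesterday → Pre_get_buy_price_and_time stock_prices_yesterday → Spec_get_buy_price_and_time stock_prices_yesterday (get_buy_price_and_time stock_prices_yesterday)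

-- ===== LEMMAS AND PROOFS =====

-- Core invariant, by induction on the list from the right: for a nonempty list with head h,
-- B's single fold returns (m, first index of m), where m is A's fold minimum; moreover m is
-- a member and a lower bound of the list.
lemma gbp_core (h : Int) (xs : List Int) (hne : xs ≠ []) (hh : xs.head? = some h) :
    (PySem.List.enumerate xs 0).foldl
      (fun acc ip => if ip.2 < acc.1 then (ip.2, ip.1) else acc) (h, 0)
    = (xs.foldl (fun b price => if b > price then price else b) h,
       (((PySem.List.index? xs
           (xs.foldl (fun b price => if b > price then price else b) h)).getD 0 : Nat) : Int))
    ∧ (xs.foldl (fun b price => if b > price then price else b) h) ∈ xs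
    ∧ ∀ p ∈ xs, (xs.foldl (fun b price => if b > price then price else b) h) ≤ p := by
  induction xs using List.reverseRecOn with
  | nil => exact absurd rfl hne
  | append_singleton l x ih =>
    rcases eq_or_ne l [] with hl | hl
    · subst hl
      simp at hh; subst hh
      simp [PySem.List.enumerate, PySem.List.index?]
    · have hh' : l.head? = some h := by
        rcases l with _ | ⟨a, t⟩
        · exact absurd rfl hl
        · simpa using hh
      obtain ⟨ihB, ihMem, ihLB⟩ := ih hl hh'
      have hEnum : PySem.List.enumerate (l ++ [x]) 0
          = PySem.List.enumerate l 0 ++ [((l.length : Int), x)] := by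
        simp [PySem.List.enumerate_append]
      set m := l.foldl (fun b price => if b > price then price else b) h with hm
      have hFoldA : (l ++ [x]).foldl (fun b price => if b > price then price else b) h
          = if m > x then x else m := by
        simp [List.foldl_append, ← hm]
      have hFoldB : (PySem.List.enumerate (l ++ [x]) 0).foldl
            (fun acc ip => if ip.2 < acc.1 then (ip.2, ip.1) else acc) (h, 0)
          = if x < m then (x, (l.length : Int))
            else (m, (((PySem.List.index? l m).getD 0 : Nat) : Int)) := by
        rw [hEnum, List.foldl_append, ihB]
        by_cases hx : x < m <;> simp [hx]
      by_cases hx : x < m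
      · have hnotmem : x ∉ l := fun hmem => absurd (ihLB x hmem) (by omega)
        refine ⟨?_, ?_, ?_⟩
        · rw [hFoldB, hFoldA, if_pos (by omega : m > x), if_pos hx,
            PySem.List.index?_append_singleton_self l x hnotmem]
          simp
        · rw [hFoldA, if_pos (by omega : m > x)]; simp
        · rw [hFoldA, if_pos (by omega : m > x)]
          intro p hp
          rcases List.mem_append.1 hp with hp | hp
          · have := ihLB p hp; omega
          · simp at hp; omega
      · have hmx : ¬ m > x := by omega
        refine ⟨?_, ?_, ?_⟩
        · rw [hFoldB, hFoldA, if_neg hmx, if_neg hx,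
            PySem.List.index?_append_of_mem _ ihMem]
        · rw [hFoldA, if_neg hmx]; exact List.mem_append.2 (Or.inl ihMem)
        · rw [hFoldA, if_neg hmx]
          intro p hp
          rcases List.mem_append.1 hp with hp | hp
          · exact ihLB p hp
          · simp at hp; omega

-- ===== VERDICT (by name: the statement is the Claim_ definition above) =====
theorem get_buy_price_and_time_spec : Claim_equal_get_buy_price_and_time := by
  intro xs _ hpre
  rcases xs with _ | ⟨h, t⟩
  · exact absurd rfl hpre
  unfold Spec_get_buy_price_and_time get_buy_price_and_time get_buy_price_and_time_alt
  have hget : PySem.List.pyGet? (h :: t) 0 = some h := by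
    simp [PySem.List.pyGet?, PySem.List.pyIdx?]
  rw [hget]
  exact ((gbp_core h (h :: t) (by simp) (by simp)).1).symm
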